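-- pv_equiv track=rewrite | github.com/sayhelloai/mavis | apps/api/app/services/enrichment_service.py | _rank_by_title
-- ===== SOURCE A (Python) =====
-- from typing import Optional
--
-- def _rank_by_title(candidates: list[dict], target_titles: list[str], name_key: str, email_key: str) -> Optional[dict]:
--     """Return the candidate whose title best matches target_titles."""
--     if not candidates:
--         return None
--
--     target_lower = [t.lower() for t in target_titles]
--
--     def score(candidate: dict) -> int:
--         title = (candidate.get("position") or candidate.get("title") or "").lower()
--         for t in target_lower:
--             if t in title or title in t:
--                 return 1
--         return 0
--
--     ranked = sorted(candidates, key=score, reverse=True)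
--     # Return first candidate that has an email
--     for c in ranked:
--         if c.get(email_key):
--             return c
--     return None
-- ===== SOURCE B (Python) =====
-- def _rank_by_title(candidates, target_titles, name_key, email_key):
--     """Return the candidate whose title best matches target_titles."""
--     if not candidates:
--         return None
--
--     targets = [t.lower() for t in target_titles]
--
--     def matches(candidate):
--         title = (candidate.get("position") or candidate.get("title") or "").lower()
--         return any(t in title or title in t for t in targets)
--
--     # First pass: first candidate (original order) with an email AND a title match.
--     for c in candidates:
--         if c.get(email_key) and matches(c):
--             return c
--     # Fallback: first candidate with an email at all.
--     for c in candidates: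
--         if c.get(email_key):
--             return c
--     return None
-- ===== Notes on version B (the rewrite author's own statement) =====
-- stated objective: alternative
-- what changed: Drops the sort entirely: since the score is 0/1 and Python's sort is stable, B replaces sorted(..., reverse=True) plus a scan with two sequential passes over the candidates in original order (first email-bearing title match, else first email-bearer), short-circuiting the title test at the first hit.
import Mathlib
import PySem

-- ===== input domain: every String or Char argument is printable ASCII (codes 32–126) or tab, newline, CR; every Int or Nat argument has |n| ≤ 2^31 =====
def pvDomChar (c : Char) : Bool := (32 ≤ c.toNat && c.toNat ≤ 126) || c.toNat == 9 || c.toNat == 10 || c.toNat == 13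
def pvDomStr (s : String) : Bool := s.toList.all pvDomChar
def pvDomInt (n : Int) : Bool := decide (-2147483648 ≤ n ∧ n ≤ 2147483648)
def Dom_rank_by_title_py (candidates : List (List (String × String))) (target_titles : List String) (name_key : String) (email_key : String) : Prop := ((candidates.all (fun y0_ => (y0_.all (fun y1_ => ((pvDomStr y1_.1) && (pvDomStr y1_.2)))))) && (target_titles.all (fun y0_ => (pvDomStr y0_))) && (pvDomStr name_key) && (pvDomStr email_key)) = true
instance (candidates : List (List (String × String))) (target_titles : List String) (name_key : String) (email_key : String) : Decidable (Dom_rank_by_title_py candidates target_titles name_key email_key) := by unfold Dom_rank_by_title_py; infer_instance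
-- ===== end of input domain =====

-- B drops A's stable sort on a 0/1 score: two sequential passes in original order
-- (first email-bearing title match, else first email-bearer) return the same candidate; objective: alternative decomposition.


-- ===== PORT A =====
-- `x or y` on strings/None: first truthy value, else the default
def pvA_orStr (o : Option String) (d : String) : String :=
  match o with
  | some s => if s == "" then d else s
  | none => d

-- title = (candidate.get("position") or candidate.get("title") or "").lower()
def pvA_titleLower (c : List (String × String)) : String :=
  PySem.Str.lower (pvA_orStr ((PySem.Dict.mk c).get? "position") (pvA_orStr ((PySem.Dict.mk c).get? "title") ""))

-- the for-loop of score: early return 1 on a match, else 0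
def pvA_scoreLoop (title : String) : List String → Int
  | [] => 0
  | t :: ts => if PySem.Str.isIn t title || PySem.Str.isIn title t then 1 else pvA_scoreLoop title ts

def pvA_score (target_lower : List String) (c : List (String × String)) : Int :=
  pvA_scoreLoop (pvA_titleLower c) target_lower

-- truthiness of candidate.get(email_key)
def pvA_truthy (o : Option String) : Bool :=
  match o with
  | some s => !(s == "")
  | none => false

-- 'for c in ranked: if c.get(email_key): return c' / 'return None'
def pvA_firstEmail (email_key : String) : List (List (String × String)) → Option (List (String × String))
  | [] => none
  | c :: cs => if pvA_truthy ((PySem.Dict.mk c).get? email_key) then some c else pvA_firstEmail email_key cs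

def rank_by_title_py (candidates : List (List (String × String))) (target_titles : List String) (name_key : String) (email_key : String) : Option (List (String × String)) :=
  if candidates = [] then none
  else
    let target_lower := target_titles.map (fun t => PySem.Str.lower t)
    let ranked := PySem.List.sorted candidates (fun c => pvA_score target_lower c) true
    pvA_firstEmail email_key ranked

-- ===== PORT B =====
def pvB_orStr (o : Option String) (d : String) : String :=
  match o with
  | some s => if s == "" then d else s
  | none => d

-- matches(candidate): any(t in title or title in t for t in targets)
def pvB_matches (targets : List String) (c : List (String × String)) : Bool :=
  let title := PySem.Str.lower (pvB_orStr ((PySem.Dict.mk c).get? "position") (pvB_orStr ((PySem.Dict.mk c).get? "title") ""))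
  targets.any (fun t => PySem.Str.isIn t title || PySem.Str.isIn title t)

def pvB_hasEmail (email_key : String) (c : List (String × String)) : Bool :=
  match (PySem.Dict.mk c).get? email_key with
  | some s => !(s == "")
  | none => false

def rank_by_title_py_alt (candidates : List (List (String × String))) (target_titles : List String) (name_key : String) (email_key : String) : Option (List (String × String)) :=
  if candidates = [] then none
  else
    let targets := target_titles.map (fun t => PySem.Str.lower t)
    match candidates.find? (fun c => pvB_hasEmail email_key c && pvB_matches targets c) with
    | some c => some c
    | none => candidates.find? (fun c => pvB_hasEmail email_key c)

-- ===== PRECONDITION & SPEC =====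
def Spec_rank_by_title_py (candidates : List (List (String × String))) (target_titles : List String) (name_key : String) (email_key : String) (out : Option (List (String × String))) : Prop := out = rank_by_title_py_alt candidates target_titles name_key email_key
instance (candidates : List (List (String × String))) (target_titles : List String) (name_key : String) (email_key : String) (out : Option (List (String × String))) : Decidable (Spec_rank_by_title_py candidates target_titles name_key email_key out) := by unfold Spec_rank_by_title_py; infer_instance

-- ===== CLAIM (what is proved, stated in full; the proofs are below) =====
def Claim_equal_rank_by_title_py : Prop := ∀ (candidates : List (List (String × String))) (target_titles : List String) (name_key : String) (email_key : String), Dom_rank_by_title_py candidates target_titles name_key email_key → Spec_rank_by_title_py candidates target_titles name_key email_key (rank_by_title_py candidates target_titles name_key email_key)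

-- ===== LEMMAS AND PROOFS =====

-- A's early-return score loop is 1 iff B's `any` match test holds
theorem pvA_scoreLoop_eq (title : String) (ts : List String) :
    pvA_scoreLoop title ts = if ts.any (fun t => PySem.Str.isIn t title || PySem.Str.isIn title t) then 1 else 0 := by
  induction ts with
  | nil => simp [pvA_scoreLoop]
  | cons t ts ih =>
    simp only [pvA_scoreLoop, ih, List.any_cons, Bool.or_eq_true]
    split_ifs <;> tauto

theorem pvA_score_eq (tl : List String) (c : List (String × String)) :
    pvA_score tl c = if pvB_matches tl c then 1 else 0 := by
  rw [pvA_score, pvA_scoreLoop_eq]; rfl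

-- skipping an all-false prefix of insertBy
theorem insertBy_append_skip {α : Type} (before : α → α → Bool) (x : α) (as bs : List α)
    (h : ∀ a ∈ as, before x a = false) :
    PySem.List.insertBy before x (as ++ bs) = as ++ PySem.List.insertBy before x bs := by
  induction as with
  | nil => rfl
  | cons a as ih =>
    have ha := h a (by simp)
    simp [List.cons_append, PySem.List.insertBy, ha, ih (fun a ha' => h a (by simp [ha']))]

-- reverse-stable insertion with a 0/1 key: matches stay in front (in order), non-matches behind (in order)
theorem foldl_insertBy_split {α : Type} (m : α → Bool) (xs : List α) :
    ∀ (as bs : List α), (∀ a ∈ as, m a = true) → (∀ b ∈ bs, m b = false) →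
    xs.foldl (fun acc x => PySem.List.insertBy
        (fun a b => decide ((if m b then (1 : Int) else 0) < (if m a then (1 : Int) else 0))) x acc) (as ++ bs)
      = (as ++ xs.filter m) ++ (bs ++ xs.filter (fun c => !m c)) := by
  induction xs with
  | nil => intro as bs _ _; simp
  | cons x xs ih =>
    intro as bs has hbs
    simp only [List.foldl_cons]
    by_cases hx : m x = true
    · have hstep : PySem.List.insertBy
          (fun a b => decide ((if m b then (1 : Int) else 0) < (if m a then (1 : Int) else 0))) x (as ++ bs)
          = (as ++ [x]) ++ bs := by
        rw [insertBy_append_skip _ _ as bs (by intro a ha; simp [has a ha, hx])]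
        cases bs with
        | nil => simp [PySem.List.insertBy]
        | cons b bs' =>
          have hb := hbs b (by simp)
          simp [PySem.List.insertBy, hb, hx]
      rw [hstep, ih (as ++ [x]) bs
        (by intro a ha; rcases List.mem_append.mp ha with h | h
            · exact has a h
            · simp at h; subst h; exact hx) hbs]
      simp [hx]
    · have hx' : m x = false := by simpa using hx
      have hstep : PySem.List.insertBy
          (fun a b => decide ((if m b then (1 : Int) else 0) < (if m a then (1 : Int) else 0))) x (as ++ bs)
          = as ++ (bs ++ [x]) := by
        rw [PySem.List.insertBy_of_forall_not_before]
        · simp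
        · intro y _
          simp [hx']
          split_ifs <;> norm_num
      rw [hstep, ih as (bs ++ [x]) has
        (by intro b hb; rcases List.mem_append.mp hb with h | h
            · exact hbs b h
            · simp at h; subst h; exact hx')]
      simp [hx']

-- A's stable reverse sort by the 0/1 score is exactly "matches first, then non-matches", each in original order
theorem sorted_eq_filter_split (tl : List String) (candidates : List (List (String × String))) :
    PySem.List.sorted candidates (fun c => pvA_score tl c) true
      = candidates.filter (pvB_matches tl) ++ candidates.filter (fun c => !pvB_matches tl c) := by
  have hkey : (fun c => pvA_score tl c)
      = fun c => if pvB_matches tl c then (1 : Int) else 0 := funext (fun c => pvA_score_eq tl c)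
  rw [hkey, PySem.List.sorted_rev_eq_foldl_insertBy]
  simpa using foldl_insertBy_split (pvB_matches tl) candidates [] [] (by simp) (by simp)

-- A's email scan is find?
theorem pvA_firstEmail_eq_find? (ek : String) (l : List (List (String × String))) :
    pvA_firstEmail ek l = l.find? (fun c => pvB_hasEmail ek c) := by
  induction l with
  | nil => rfl
  | cons c cs ih =>
    have : pvA_truthy ((PySem.Dict.mk c).get? ek) = pvB_hasEmail ek c := by
      simp [pvA_truthy, pvB_hasEmail]
    simp only [pvA_firstEmail, List.find?_cons, this, ih]
    by_cases h : pvB_hasEmail ek c = true <;> simp [h]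

-- find? over a filtered list
theorem find?_filter_eq {α : Type} (p q : α → Bool) (l : List α) :
    (l.filter q).find? p = l.find? (fun x => p x && q x) := by
  induction l with
  | nil => rfl
  | cons x l ih =>
    by_cases hq : q x = true
    · by_cases hp : p x = true <;> simp [List.filter_cons, hq, hp, ih]
    · have hq' : q x = false := by simpa using hq
      simp [List.filter_cons, hq', ih]

-- when no candidate has both email and match, the first email-bearer is a non-match anyway
theorem find?_email_not {α : Type} (e m : α → Bool) (l : List α)
    (h : ∀ c ∈ l, ¬(e c = true ∧ m c = true)) :
    l.find? (fun c => e c && !m c) = l.find? e := by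
  induction l with
  | nil => rfl
  | cons c cs ih =>
    have ih' := ih (fun c hc => h c (by simp [hc]))
    by_cases he : e c = true
    · have hm : m c = false := by
        by_contra hm'
        exact h c (by simp) ⟨he, by simpa using hm'⟩
      simp [he, hm]
    · have he' : e c = false := by simpa using he
      simp [he', ih']

-- ===== VERDICT (by name: the statement is the Claim_ definition above) =====
theorem rank_by_title_py_spec : Claim_equal_rank_by_title_py := by
  intro candidates target_titles name_key email_key _
  unfold Spec_rank_by_title_py rank_by_title_py rank_by_title_py_alt
  by_cases hc : candidates = []
  · simp [hc]
  · simp only [hc, ite_false]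
    set tl := target_titles.map (fun t => PySem.Str.lower t) with htl
    rw [sorted_eq_filter_split tl candidates, pvA_firstEmail_eq_find?, List.find?_append,
        find?_filter_eq, find?_filter_eq]
    cases hfind : candidates.find? (fun c => pvB_hasEmail email_key c && pvB_matches tl c) with
    | some c => simp
    | none =>
      have hno : ∀ c ∈ candidates, ¬(pvB_hasEmail email_key c = true ∧ pvB_matches tl c = true) := by
        intro c hmem hcontra
        have := List.find?_eq_none.mp hfind c hmem
        simp [hcontra.1, hcontra.2] at this
      rw [Option.none_or, find?_email_not _ _ _ hno]
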